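-- pv_equiv track=rewrite | github.com/mkhoshpa/Vanilla-Python-ML | id3-letter.py | listofnumberofsamoles
-- ===== SOURCE A (Python) =====
-- def listofnumberofsamoles(train, attrs):
--     if len(attrs)==0:
--         return len(train)
--     total=0
--     for sample in train:
--         n = 0
--         for attr in attrs:
--             if (sample[attr[0]] == attr[1]):
--                 n = n + 1
--                 if (n == len(attrs)):
--                     total = total+1
--     return total
-- ===== SOURCE B (Python) =====
-- def listofnumberofsamoles(train, attrs):
--     working = list(train)
--     for attr in attrs:
--         working = [s for s in working if s[attr[0]] == attr[1]]
--     return len(working)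
-- ===== Notes on version B (the rewrite author's own statement) =====
-- stated objective: simpler
-- what changed: B replaces A's sample-major scan with a per-sample match counter by attribute-major progressive filtering: a working list starts as all of train and each attribute condition filters it, the answer being the final length.
import Mathlib
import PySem

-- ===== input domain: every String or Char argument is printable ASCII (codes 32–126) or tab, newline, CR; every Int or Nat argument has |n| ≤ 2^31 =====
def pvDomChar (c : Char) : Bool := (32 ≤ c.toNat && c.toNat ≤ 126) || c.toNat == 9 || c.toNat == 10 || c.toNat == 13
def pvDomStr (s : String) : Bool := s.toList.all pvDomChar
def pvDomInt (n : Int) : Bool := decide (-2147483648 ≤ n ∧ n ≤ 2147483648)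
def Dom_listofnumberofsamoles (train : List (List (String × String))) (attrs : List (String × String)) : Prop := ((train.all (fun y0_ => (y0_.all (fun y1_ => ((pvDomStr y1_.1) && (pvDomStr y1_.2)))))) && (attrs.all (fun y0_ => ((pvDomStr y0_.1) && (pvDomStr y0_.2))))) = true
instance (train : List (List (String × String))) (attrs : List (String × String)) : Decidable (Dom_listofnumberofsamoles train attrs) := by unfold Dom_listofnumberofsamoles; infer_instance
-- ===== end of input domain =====

-- B filters the sample list attribute by attribute instead of counting matches per sample; same cost, simpler ("simpler", not faster).

-- ===== PORT A =====
-- sample[attr[0]] is a dict lookup (first match in the association list); a missing key is a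
-- KeyError in Python, excluded by Pre_ below (the port treats a missing key as a non-match).
def listofnumberofsamoles (train : List (List (String × String))) (attrs : List (String × String)) : Int :=
  if attrs.length = 0 then (train.length : Int)
  else
    train.foldl (fun total sample =>
      (attrs.foldl (fun (st : Int × Int) attr =>
          if sample.lookup attr.1 = some attr.2 then
            if st.1 + 1 = (attrs.length : Int) then (st.1 + 1, st.2 + 1)
            else (st.1 + 1, st.2)
          else st)
        ((0 : Int), total)).2) 0

-- ===== PORT B =====
def listofnumberofsamoles_alt (train : List (List (String × String))) (attrs : List (String × String)) : Int :=
  ((attrs.foldl (fun working attr =>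
      working.filter (fun s => decide (s.lookup attr.1 = some attr.2))) train).length : Int)

-- ===== PRECONDITION & SPEC =====
-- Pre_ excludes exactly the inputs where Python A raises KeyError: some attribute key missing
-- from some sample while attrs is nonempty.  A returns on everything Pre_ admits.
def Pre_listofnumberofsamoles (train : List (List (String × String))) (attrs : List (String × String)) : Prop :=
  attrs = [] ∨ ∀ s ∈ train, ∀ a ∈ attrs, (s.lookup a.1).isSome = true
instance (train : List (List (String × String))) (attrs : List (String × String)) : Decidable (Pre_listofnumberofsamoles train attrs) := by unfold Pre_listofnumberofsamoles; infer_instance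

def pvWitness_listofnumberofsamoles : (List (List (String × String))) × (List (String × String)) :=
  ([[("a", "x"), ("b", "y")], [("a", "z"), ("b", "y")]], [("a", "x")])

def Spec_listofnumberofsamoles (train : List (List (String × String))) (attrs : List (String × String)) (out : Int) : Prop := out = listofnumberofsamoles_alt train attrs
instance (train : List (List (String × String))) (attrs : List (String × String)) (out : Int) : Decidable (Spec_listofnumberofsamoles train attrs out) := by unfold Spec_listofnumberofsamoles; infer_instance

-- ===== CLAIM (what is proved, stated in full; the proofs are below) =====
def Claim_equal_listofnumberofsamoles : Prop := ∀ (train : List (List (String × String))) (attrs : List (String × String)), Dom_listofnumberofsamoles train attrs → Pre_listofnumberofsamoles train attrs → Spec_listofnumberofsamoles train attrs (listofnumberofsamoles train attrs)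

-- ===== LEMMAS AND PROOFS =====

-- B's fold of filters is one filter by the conjunction of all conditions.
theorem pv_foldl_filter (attrs : List (String × String)) :
    ∀ (train : List (List (String × String))),
      attrs.foldl (fun working attr =>
        working.filter (fun s => decide (s.lookup attr.1 = some attr.2))) train
      = train.filter (fun s => attrs.all (fun a => decide (s.lookup a.1 = some a.2))) := by
  induction attrs with
  | nil => intro train; simp
  | cons a l ih =>
    intro train
    simp only [List.foldl_cons, ih, List.filter_filter, List.all_cons]
    exact List.filter_congr (fun x _ => Bool.and_comm _ _)

-- A's inner fold: the counter ends at the number of matching attributes, and the total is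
-- bumped exactly when the counter passes through L.
theorem pv_inner (s : List (String × String)) (L : Int) :
    ∀ (l : List (String × String)) (n t : Int),
      l.foldl (fun (st : Int × Int) attr =>
          if s.lookup attr.1 = some attr.2 then
            if st.1 + 1 = L then (st.1 + 1, st.2 + 1)
            else (st.1 + 1, st.2)
          else st) (n, t)
      = (n + (l.countP (fun a => decide (s.lookup a.1 = some a.2)) : Int),
         t + if n < L ∧ L ≤ n + (l.countP (fun a => decide (s.lookup a.1 = some a.2)) : Int) then 1 else 0) := by
  intro l
  induction l with
  | nil => intro n t; simp
  | cons a l ih =>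
    intro n t
    by_cases h : s.lookup a.1 = some a.2
    · by_cases hL : n + 1 = L <;>
        simp only [List.foldl_cons, h, if_pos, hL, if_false, List.countP_cons,
          decide_eq_true_eq, ih, Prod.mk.injEq] <;>
      · refine ⟨by push_cast; omega, ?_⟩
        split_ifs <;> push_cast at * <;> omega
    · simp only [List.foldl_cons, h, if_false, List.countP_cons, decide_eq_true_eq, ih]
      simp

theorem pv_countP_le (s : List (String × String)) (l : List (String × String)) :
    l.countP (fun a => decide (s.lookup a.1 = some a.2)) ≤ l.length :=
  List.countP_le_length

-- A's outer fold counts the samples matching every attribute.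
theorem pv_outer (attrs : List (String × String)) (h : attrs ≠ []) :
    ∀ (train : List (List (String × String))) (t : Int),
      train.foldl (fun total sample =>
        (attrs.foldl (fun (st : Int × Int) attr =>
            if sample.lookup attr.1 = some attr.2 then
              if st.1 + 1 = (attrs.length : Int) then (st.1 + 1, st.2 + 1)
              else (st.1 + 1, st.2)
            else st)
          ((0 : Int), total)).2) t
      = t + ((train.filter (fun s => attrs.all (fun a => decide (s.lookup a.1 = some a.2)))).length : Int) := by
  intro train
  induction train with
  | nil => intro t; simp
  | cons s train ih =>
    intro t
    have hlen : 1 ≤ attrs.length := by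
      cases attrs with
      | nil => exact absurd rfl h
      | cons a l => simp
    have hle := pv_countP_le s attrs
    have hiff : (attrs.all fun a => decide (s.lookup a.1 = some a.2)) = true ↔
        attrs.countP (fun a => decide (s.lookup a.1 = some a.2)) = attrs.length := by
      rw [List.all_eq_true, List.countP_eq_length]
    rw [List.foldl_cons, pv_inner s (attrs.length : Int) attrs 0 t, ih]
    simp only [List.filter_cons]
    by_cases hall : (attrs.all fun a => decide (s.lookup a.1 = some a.2)) = true
    · have hcnt := hiff.mp hall
      rw [if_pos hall, if_pos (by constructor <;> omega)]
      simp only [List.length_cons]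
      push_cast
      ring
    · have hcnt : attrs.countP (fun a => decide (s.lookup a.1 = some a.2)) < attrs.length := by
        rcases Nat.lt_or_ge (attrs.countP (fun a => decide (s.lookup a.1 = some a.2))) attrs.length with hlt | hge
        · exact hlt
        · exact absurd (hiff.mpr (le_antisymm hle hge)) hall
      rw [if_neg hall, if_neg (by omega)]
      ring

-- ===== VERDICT (by name: the statement is the Claim_ definition above) =====
theorem listofnumberofsamoles_spec : Claim_equal_listofnumberofsamoles := by
  intro train attrs _ _
  unfold Spec_listofnumberofsamoles listofnumberofsamoles listofnumberofsamoles_alt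
  rw [pv_foldl_filter]
  by_cases h : attrs.length = 0
  · rw [if_pos h]
    rw [List.length_eq_zero_iff.mp h]
    simp
  · rw [if_neg h]
    rw [pv_outer attrs (by intro hc; exact h (by rw [hc]; rfl)) train 0]
    ring
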